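-- pv_equiv track=rewrite | github.com/Romain-Amigon/alphazero_snakebyte | agent/mcts.py | get_joint_actions
-- ===== SOURCE A (Python) =====
-- from itertools import product
--
-- DIRS = ["UP", "DOWN", "LEFT", "RIGHT"]
--
-- def get_joint_actions(bots):
--     bot_ids = list(bots.keys())
--     all_combinations = product(DIRS, repeat=len(bot_ids))
--     joint_actions = []
--     for combo in all_combinations:
--         action_dict = {bot_ids[i]: combo[i] for i in range(len(bot_ids))}
--         joint_actions.append(action_dict)
--     return joint_actions
-- ===== SOURCE B (Python) =====
-- DIRS = ["UP", "DOWN", "LEFT", "RIGHT"]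
--
-- def get_joint_actions(bots):
--     # Grow partial joint-action dicts one bot at a time (DIRS innermost,
--     # so the last bot varies fastest, matching itertools.product order).
--     acc = [{}]
--     for bot in bots:
--         acc = [{**partial, bot: d} for partial in acc for d in DIRS]
--     return acc
-- ===== Notes on version B (the rewrite author's own statement) =====
-- stated objective: alternative
-- what changed: B replaces itertools.product over DIRS^n plus per-tuple index-mapped dict comprehensions by a single fold over the bots that extends each partial joint-action dict with every direction (DIRS innermost preserves product order).
import Mathlib
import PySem

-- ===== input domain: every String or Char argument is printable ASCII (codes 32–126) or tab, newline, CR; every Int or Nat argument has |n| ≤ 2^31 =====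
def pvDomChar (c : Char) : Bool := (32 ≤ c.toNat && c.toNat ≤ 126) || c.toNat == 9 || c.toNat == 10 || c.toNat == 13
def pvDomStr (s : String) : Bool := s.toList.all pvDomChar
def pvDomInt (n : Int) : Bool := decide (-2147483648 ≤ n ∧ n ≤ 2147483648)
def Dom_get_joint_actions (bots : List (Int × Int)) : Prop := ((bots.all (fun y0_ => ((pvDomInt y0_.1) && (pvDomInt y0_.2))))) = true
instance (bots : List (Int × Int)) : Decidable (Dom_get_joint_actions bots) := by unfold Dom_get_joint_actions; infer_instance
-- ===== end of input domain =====

-- B builds the joint-action list by folding over the bots, extending partial dicts,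
-- instead of enumerating DIRS^n with a product and index-mapping each tuple (objective: alternative).


-- ===== PORT A =====
def pvDirs : List String := ["UP", "DOWN", "LEFT", "RIGHT"]

-- itertools.product(DIRS, repeat=n): first coordinate varies slowest
def pvProdRep : Nat → List (List String)
  | 0 => [[]]
  | n + 1 => pvDirs.flatMap (fun d => (pvProdRep n).map (fun rest => d :: rest))

-- {bot_ids[i]: combo[i] for i in range(len(bot_ids))}
def pvMkDict (ids : List Int) (combo : List String) : List (Int × String) :=
  ((List.range ids.length).foldl
      (fun d i => d.insert (ids.getD i 0) (combo.getD i "")) PySem.Dict.empty).items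

def get_joint_actions (bots : List (Int × Int)) : List (List (Int × String)) :=
  let bot_ids := bots.map Prod.fst
  let all_combinations := pvProdRep bot_ids.length
  all_combinations.foldl (fun joint_actions combo => joint_actions ++ [pvMkDict bot_ids combo]) []

-- ===== PORT B =====
def get_joint_actions_alt (bots : List (Int × Int)) : List (List (Int × String)) :=
  (bots.map Prod.fst).foldl
    (fun acc bot => acc.flatMap (fun partial_ => pvDirs.map (fun d => partial_ ++ [(bot, d)])))
    [[]]

-- ===== PRECONDITION & SPEC =====
-- Pre_ is the representation invariant of A's dict argument: a Python dict cannot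
-- carry duplicate keys, so it excludes no input the Python A accepts.
def Pre_get_joint_actions (bots : List (Int × Int)) : Prop := (bots.map Prod.fst).Nodup
instance (bots : List (Int × Int)) : Decidable (Pre_get_joint_actions bots) := by unfold Pre_get_joint_actions; infer_instance

def pvWitness_get_joint_actions : (List (Int × Int)) := [(1, 2), (3, 4)]

def Spec_get_joint_actions (bots : List (Int × Int)) (out : List (List (Int × String))) : Prop := out = get_joint_actions_alt bots
instance (bots : List (Int × Int)) (out : List (List (Int × String))) : Decidable (Spec_get_joint_actions bots out) := by unfold Spec_get_joint_actions; infer_instance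

-- ===== CLAIM (what is proved, stated in full; the proofs are below) =====
def Claim_equal_get_joint_actions : Prop := ∀ (bots : List (Int × Int)), Dom_get_joint_actions bots → Pre_get_joint_actions bots → Spec_get_joint_actions bots (get_joint_actions bots)

-- ===== LEMMAS AND PROOFS =====

lemma pvProdRep_length {n : Nat} {combo : List String} (h : combo ∈ pvProdRep n) :
    combo.length = n := by
  induction n generalizing combo with
  | zero => simp [pvProdRep] at h; simp [h]
  | succ n ih =>
    simp only [pvProdRep, List.mem_flatMap, List.mem_map] at h
    obtain ⟨d, -, rest, hrest, rfl⟩ := h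
    simp [ih hrest]

lemma pv_map_getD_range {α : Type} (l : List α) (d : α) :
    (List.range l.length).map (fun i => l.getD i d) = l := by
  apply List.ext_getElem
  · simp
  · intro i h1 h2
    simp [List.getElem?_eq_getElem h2]

lemma pvMkDict_eq_zip {ids : List Int} {combo : List String}
    (hnd : ids.Nodup) (hlen : combo.length = ids.length) :
    pvMkDict ids combo = ids.zip combo := by
  unfold pvMkDict
  rw [PySem.Dict.items_foldl_insert_fresh
      (k := fun i => ids.getD i 0) (v := fun i => combo.getD i "")]
  · rw [show (PySem.Dict.empty : PySem.Dict Int String).items = [] from rfl, List.nil_append]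
    apply List.ext_getElem
    · simp [hlen]
    · intro i h1 h2
      have hi : i < ids.length := by simpa using h1
      have hc : i < combo.length := by omega
      simp [hi, hc, List.getElem_zip]
  · intro a _
    exact PySem.Dict.contains_empty _
  · rw [pv_map_getD_range]
    exact hnd

lemma pv_foldl_step (ids : List Int) (acc : List (List (Int × String))) :
    ids.foldl
      (fun acc bot => acc.flatMap (fun partial_ => pvDirs.map (fun d => partial_ ++ [(bot, d)])))
      acc
    = acc.flatMap (fun p => (pvProdRep ids.length).map (fun combo => p ++ ids.zip combo)) := by
  induction ids generalizing acc with
  | nil => simp [pvProdRep]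
  | cons id ids ih =>
    simp only [List.foldl_cons, ih, List.length_cons, pvProdRep]
    simp [List.flatMap_assoc, List.map_map, List.flatMap_map, List.map_flatMap, List.append_assoc]
    simp only [Function.comp_def, List.zip_cons_cons]

-- ===== VERDICT (by name: the statement is the Claim_ definition above) =====
theorem get_joint_actions_spec : Claim_equal_get_joint_actions := by
  intro bots _ hpre
  unfold Spec_get_joint_actions get_joint_actions get_joint_actions_alt
  rw [PySem.List.foldl_append_singleton_eq_map, pv_foldl_step]
  simp only [List.flatMap_cons, List.flatMap_nil, List.append_nil, List.nil_append]
  exact List.map_congr_left fun combo hc =>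
    pvMkDict_eq_zip hpre (pvProdRep_length hc)
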